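-- pv_equiv track=rewrite | github.com/Tamir-K/Advent-of-Code-2025 | day08_part1.py | find_n_largest_connected_components
-- ===== SOURCE A (Python) =====
-- from collections import defaultdict
--
-- def find_n_largest_connected_components(coords, edges, n):
--     # Create an adjacency list from edges
--     graph = defaultdict(list)
--
--     for _, u, v in edges:
--         graph[u].append(v)
--         graph[v].append(u)
--
--     # Function to perform DFS and find all connected nodes
--     def dfs(node, visited):
--         visited.add(node)
--         component_size = 1
--         for neighbor in graph[node]:
--             if neighbor not in visited:
--                 component_size += dfs(neighbor, visited)
--         return component_size
--
--     visited = set()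
--     component_sizes = []
--
--     for coord in coords:
--         if coord not in visited:
--             size = dfs(coord, visited)
--             component_sizes.append(size)
--
--     # Sort sizes and return the top 3
--     component_sizes.sort(reverse=True)
--     return component_sizes[:n]
-- ===== SOURCE B (Python) =====
-- def find_n_largest_connected_components(coords, edges, n):
--     # Level-synchronous frontier expansion (set-based BFS) over a set-valued
--     # adjacency map, instead of recursive DFS over a defaultdict of lists.
--     nbrs = {}
--     for _, u, v in edges:
--         nbrs.setdefault(u, set()).add(v)
--         nbrs.setdefault(v, set()).add(u)
--
--     seen = set()
--     sizes = []
--     for c in coords: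
--         if c in seen:
--             continue
--         comp = {c}
--         frontier = {c}
--         while frontier:
--             frontier = {y for x in frontier for y in nbrs.get(x, ())} - comp
--             comp |= frontier
--         seen |= comp
--         sizes.append(len(comp))
--     sizes.sort(reverse=True)
--     return sizes[:n]
-- ===== Notes on version B (the rewrite author's own statement) =====
-- stated objective: alternative
-- what changed: The per-coordinate recursive DFS over a defaultdict-of-lists adjacency map is replaced by level-synchronous frontier expansion (set-based BFS): a dict of neighbour sets is built with setdefault, and each unseen coordinate's whole component is computed as the fixpoint of repeatedly taking the frontier's neighbour set minus the component, its size being len(comp) rather than a sum of recursive return values.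
import Mathlib
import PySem

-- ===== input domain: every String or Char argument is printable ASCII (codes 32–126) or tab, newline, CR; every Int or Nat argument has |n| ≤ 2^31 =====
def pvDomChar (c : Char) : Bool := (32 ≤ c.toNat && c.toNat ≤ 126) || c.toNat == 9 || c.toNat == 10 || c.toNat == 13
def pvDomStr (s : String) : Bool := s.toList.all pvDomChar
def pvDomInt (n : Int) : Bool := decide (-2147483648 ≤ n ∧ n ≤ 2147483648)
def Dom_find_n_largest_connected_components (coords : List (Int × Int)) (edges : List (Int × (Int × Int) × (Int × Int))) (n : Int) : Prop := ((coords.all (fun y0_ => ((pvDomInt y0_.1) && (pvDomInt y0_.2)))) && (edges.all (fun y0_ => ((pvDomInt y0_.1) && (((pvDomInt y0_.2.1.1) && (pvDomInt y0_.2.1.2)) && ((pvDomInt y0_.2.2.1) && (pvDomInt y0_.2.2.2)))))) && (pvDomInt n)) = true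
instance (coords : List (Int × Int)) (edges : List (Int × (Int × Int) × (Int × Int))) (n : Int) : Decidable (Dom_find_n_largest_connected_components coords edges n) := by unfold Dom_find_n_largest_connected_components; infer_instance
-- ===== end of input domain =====

-- B replaces A's recursive DFS over a defaultdict-of-lists adjacency map by
-- level-synchronous frontier expansion (set-based BFS) over a dict of neighbour
-- sets, the component size being the cardinality of the computed set
-- (objective: alternative).

-- ===== PORT A =====
-- graph = defaultdict(list); for _, u, v in edges: graph[u].append(v); graph[v].append(u)
def pvGraphA (edges : List (Int × (Int × Int) × (Int × Int))) : PySem.Dict (Int × Int) (List (Int × Int)) :=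
  edges.foldl
    (fun g e => (g.modify e.2.1 [] (fun l => l ++ [e.2.2])).modify e.2.2 [] (fun l => l ++ [e.2.1]))
    PySem.Dict.empty

-- A's recursive dfs; the fuel guard only makes the recursion total (never exhausted on the
-- fuel the main function passes, which bounds the number of distinct reachable nodes).
mutual
def pvDfsA (g : PySem.Dict (Int × Int) (List (Int × Int))) (fuel : Nat) (node : Int × Int)
    (visited : PySem.Set (Int × Int)) : Int × PySem.Set (Int × Int) :=
  match fuel with
  | 0 => (0, visited)
  | f + 1 => pvDfsLoopA g f (g.getD node []) 1 (PySem.Set.add visited node)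
termination_by (fuel, 0)

-- "for neighbor in graph[node]: if neighbor not in visited: component_size += dfs(neighbor, visited)"
def pvDfsLoopA (g : PySem.Dict (Int × Int) (List (Int × Int))) (fuel : Nat) (ns : List (Int × Int))
    (size : Int) (visited : PySem.Set (Int × Int)) : Int × PySem.Set (Int × Int) :=
  match ns with
  | [] => (size, visited)
  | nb :: rest =>
    if PySem.Set.contains visited nb then pvDfsLoopA g fuel rest size visited
    else
      let p := pvDfsA g fuel nb visited
      pvDfsLoopA g fuel rest (size + p.1) p.2
termination_by (fuel, ns.length + 1)
end

def find_n_largest_connected_components (coords : List (Int × Int)) (edges : List (Int × (Int × Int) × (Int × Int))) (n : Int) : List Int :=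
  let graph := pvGraphA edges
  let r := coords.foldl
    (fun acc coord =>
      if PySem.Set.contains acc.2 coord then acc
      else
        let p := pvDfsA graph (2 * edges.length + coords.length + 1) coord acc.2
        (acc.1 ++ [p.1], p.2))
    (([] : List Int), (PySem.Set.empty : PySem.Set (Int × Int)))
  PySem.List.slice (PySem.List.sorted r.1 (fun x => x) true) none (some n)

-- ===== PORT B =====
-- nbrs = {}; for _, u, v in edges: nbrs.setdefault(u, set()).add(v); nbrs.setdefault(v, set()).add(u)
def pvNbrsB (edges : List (Int × (Int × Int) × (Int × Int))) : PySem.Dict (Int × Int) (PySem.Set (Int × Int)) :=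
  edges.foldl
    (fun d e =>
      let d1 := d.insert e.2.1 (PySem.Set.add (d.getD e.2.1 PySem.Set.empty) e.2.2)
      d1.insert e.2.2 (PySem.Set.add (d1.getD e.2.2 PySem.Set.empty) e.2.1))
    PySem.Dict.empty

-- "while frontier: frontier = {y for x in frontier for y in nbrs.get(x, ())} - comp; comp |= frontier".
-- The set comprehension iterates two Sets only to BUILD another Set (membership-determined),
-- ported as Set.ofList of the flatMap; the fuel only makes the loop total (never exhausted
-- on the fuel passed, which bounds the number of distinct nodes).
def pvBfsB (g : PySem.Dict (Int × Int) (PySem.Set (Int × Int))) (fuel : Nat)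
    (comp frontier : PySem.Set (Int × Int)) : PySem.Set (Int × Int) :=
  match fuel, frontier with
  | _, [] => comp
  | 0, _ :: _ => comp
  | f + 1, fr@(_ :: _) =>
    let fr' := PySem.Set.diff (PySem.Set.ofList (fr.flatMap (fun x => g.getD x PySem.Set.empty))) comp
    pvBfsB g f (PySem.Set.union comp fr') fr'

def find_n_largest_connected_components_alt (coords : List (Int × Int)) (edges : List (Int × (Int × Int) × (Int × Int))) (n : Int) : List Int :=
  let nbrs := pvNbrsB edges
  let r := coords.foldl
    (fun acc c =>
      if PySem.Set.contains acc.2 c then acc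
      else
        let comp := pvBfsB nbrs (2 * edges.length + coords.length + 1)
          (PySem.Set.ofList [c]) (PySem.Set.ofList [c])
        (acc.1 ++ [PySem.Set.len comp], PySem.Set.union acc.2 comp))
    (([] : List Int), (PySem.Set.empty : PySem.Set (Int × Int)))
  PySem.List.slice (PySem.List.sorted r.1 (fun x => x) true) none (some n)

-- ===== PRECONDITION & SPEC =====
def Spec_find_n_largest_connected_components (coords : List (Int × Int)) (edges : List (Int × (Int × Int) × (Int × Int))) (n : Int) (out : List Int) : Prop := out = find_n_largest_connected_components_alt coords edges n
instance (coords : List (Int × Int)) (edges : List (Int × (Int × Int) × (Int × Int))) (n : Int) (out : List Int) : Decidable (Spec_find_n_largest_connected_components coords edges n out) := by unfold Spec_find_n_largest_connected_components; infer_instance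

-- ===== CLAIM (what is proved, stated in full; the proofs are below) =====
def Claim_equal_find_n_largest_connected_components : Prop := ∀ (coords : List (Int × Int)) (edges : List (Int × (Int × Int) × (Int × Int))) (n : Int), Dom_find_n_largest_connected_components coords edges n → Spec_find_n_largest_connected_components coords edges n (find_n_largest_connected_components coords edges n)

-- ===== LEMMAS AND PROOFS =====

-- Reachability along A's adjacency map; the ONE graph notion both ports are related to.
def pvReach (g : PySem.Dict (Int × Int) (List (Int × Int))) (x y : Int × Int) : Prop :=
  Relation.ReflTransGen (fun a b => b ∈ g.getD a []) x y

-- the finite universe of nodes either traversal can ever touch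
def pvUniv (coords : List (Int × Int)) (edges : List (Int × (Int × Int) × (Int × Int))) : List (Int × Int) :=
  coords ++ edges.flatMap (fun e => [e.2.1, e.2.2])

-- number of not-yet-visited entries of E: the fuel/termination measure
def pvUnvis (E : List (Int × Int)) (V : PySem.Set (Int × Int)) : Nat :=
  (E.filter (fun y => !PySem.Set.contains V y)).length

lemma pvContains_true {V : PySem.Set (Int × Int)} {x : Int × Int} (h : x ∈ V) :
    PySem.Set.contains V x = true := (PySem.Set.contains_iff V x).mpr h

lemma pvContains_false {V : PySem.Set (Int × Int)} {x : Int × Int} (h : x ∉ V) :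
    PySem.Set.contains V x = false := by
  cases hc : PySem.Set.contains V x with
  | false => rfl
  | true => exact absurd ((PySem.Set.contains_iff V x).mp hc) h

lemma pvUnvis_mono (E : List (Int × Int)) {V W : PySem.Set (Int × Int)}
    (h : ∀ x, x ∈ V → x ∈ W) : pvUnvis E W ≤ pvUnvis E V := by
  refine (List.monotone_filter_right E ?_).length_le
  intro a hpa
  cases hv : PySem.Set.contains V a with
  | false => simp
  | true =>
    rw [pvContains_true (h a ((PySem.Set.contains_iff V a).mp hv))] at hpa
    exact absurd hpa (by simp)

lemma pvUnvis_cons (a : Int × Int) (t : List (Int × Int)) (V : PySem.Set (Int × Int)) :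
    pvUnvis (a :: t) V = (if a ∈ V then 0 else 1) + pvUnvis t V := by
  by_cases hm : a ∈ V
  · simp [pvUnvis, hm]
  · simp [pvUnvis, hm]; omega

lemma pvUnvis_strict (E : List (Int × Int)) {V : PySem.Set (Int × Int)} {x : Int × Int}
    (hx : x ∈ E) (hv : x ∉ V) : pvUnvis E (PySem.Set.add V x) < pvUnvis E V := by
  have hsub : ∀ y, y ∈ V → y ∈ PySem.Set.add V x :=
    fun y hy => (PySem.Set.mem_add V x y).mpr (Or.inl hy)
  induction E with
  | nil => cases hx
  | cons a t ih =>
    rw [pvUnvis_cons, pvUnvis_cons]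
    rcases List.mem_cons.mp hx with heq | hxt
    · subst heq
      rw [if_pos ((PySem.Set.mem_add V x x).mpr (Or.inr rfl)), if_neg hv]
      have hle : pvUnvis t (PySem.Set.add V x) ≤ pvUnvis t V := pvUnvis_mono t hsub
      omega
    · have hlt := ih hxt
      by_cases h1 : a ∈ V
      · rw [if_pos h1, if_pos (hsub a h1)]; omega
      · rw [if_neg h1]
        by_cases h2 : a ∈ PySem.Set.add V x
        · rw [if_pos h2]; omega
        · rw [if_neg h2]; omega

lemma pvUnvis_le (E : List (Int × Int)) (V : PySem.Set (Int × Int)) : pvUnvis E V ≤ E.length :=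
  List.length_filter_le _ E

-- visited only grows through A's dfs
lemma pvDfsLoopA_mono_of (g : PySem.Dict (Int × Int) (List (Int × Int))) (fuel : Nat)
    (hd : ∀ node vis, ∀ y ∈ vis, y ∈ (pvDfsA g fuel node vis).2) :
    ∀ ns size vis, ∀ y ∈ vis, y ∈ (pvDfsLoopA g fuel ns size vis).2 := by
  intro ns
  induction ns with
  | nil => intro size vis y hy; simpa [pvDfsLoopA] using hy
  | cons nb rest ih =>
    intro size vis y hy
    simp only [pvDfsLoopA]
    by_cases hm : nb ∈ vis
    · rw [if_pos (pvContains_true hm)]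
      exact ih size vis y hy
    · rw [if_neg (by rw [pvContains_false hm]; exact Bool.false_ne_true)]
      exact ih _ _ y (hd nb vis y hy)

lemma pvDfsA_mono (g : PySem.Dict (Int × Int) (List (Int × Int))) :
    ∀ fuel node vis, ∀ y ∈ vis, y ∈ (pvDfsA g fuel node vis).2 := by
  intro fuel
  induction fuel with
  | zero => intro node vis y hy; simpa [pvDfsA] using hy
  | succ f ih =>
    intro node vis y hy
    simp only [pvDfsA]
    exact pvDfsLoopA_mono_of g f ih _ _ _ y ((PySem.Set.mem_add vis node y).mpr (Or.inl hy))

-- the visited set stays duplicate-free through A's dfs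
lemma pvDfsLoopA_nodup_of (g : PySem.Dict (Int × Int) (List (Int × Int))) (fuel : Nat)
    (hd : ∀ node vis, vis.Nodup → (pvDfsA g fuel node vis).2.Nodup) :
    ∀ ns size vis, vis.Nodup → (pvDfsLoopA g fuel ns size vis).2.Nodup := by
  intro ns
  induction ns with
  | nil => intro size vis h; simpa [pvDfsLoopA] using h
  | cons nb rest ih =>
    intro size vis h
    simp only [pvDfsLoopA]
    by_cases hm : nb ∈ vis
    · rw [if_pos (pvContains_true hm)]; exact ih size vis h
    · rw [if_neg (by rw [pvContains_false hm]; exact Bool.false_ne_true)]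
      exact ih _ _ (hd nb vis h)

lemma pvDfsA_nodup (g : PySem.Dict (Int × Int) (List (Int × Int))) :
    ∀ fuel node vis, vis.Nodup → (pvDfsA g fuel node vis).2.Nodup := by
  intro fuel
  induction fuel with
  | zero => intro node vis h; simpa [pvDfsA] using h
  | succ f ih =>
    intro node vis h
    simp only [pvDfsA]
    exact pvDfsLoopA_nodup_of g f ih _ _ _ (PySem.Set.nodup_add vis node h)

-- A's dfs counts exactly the newly visited nodes
lemma pvCntLoop (g : PySem.Dict (Int × Int) (List (Int × Int))) (fuel : Nat)
    (hd : ∀ node vis, node ∉ vis →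
      (pvDfsA g fuel node vis).1 + (vis.length : Int) = ((pvDfsA g fuel node vis).2.length : Int)) :
    ∀ ns size vis, (pvDfsLoopA g fuel ns size vis).1 + (vis.length : Int)
      = size + ((pvDfsLoopA g fuel ns size vis).2.length : Int) := by
  intro ns
  induction ns with
  | nil => intro size vis; simp [pvDfsLoopA]
  | cons nb rest ih =>
    intro size vis
    simp only [pvDfsLoopA]
    by_cases hm : nb ∈ vis
    · rw [if_pos (pvContains_true hm)]; exact ih size vis
    · rw [if_neg (by rw [pvContains_false hm]; exact Bool.false_ne_true)]
      have h1 := hd nb vis hm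
      have h2 := ih (size + (pvDfsA g fuel nb vis).1) (pvDfsA g fuel nb vis).2
      omega

lemma pvCntDfs (g : PySem.Dict (Int × Int) (List (Int × Int))) :
    ∀ fuel node vis, node ∉ vis →
      (pvDfsA g fuel node vis).1 + (vis.length : Int) = ((pvDfsA g fuel node vis).2.length : Int) := by
  intro fuel
  induction fuel with
  | zero => intro node vis _; simp [pvDfsA]
  | succ f ih =>
    intro node vis hm
    simp only [pvDfsA]
    rw [PySem.Set.add_of_not_mem hm]
    have h := pvCntLoop g f ih (g.getD node []) 1 (vis ++ [node])
    simp only [List.length_append, List.length_cons, List.length_nil] at h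
    push_cast at h
    omega

-- everything A's dfs visits is reachable from the start node
lemma pvSndLoop (g : PySem.Dict (Int × Int) (List (Int × Int))) (fuel : Nat)
    (hd : ∀ node vis y, y ∈ (pvDfsA g fuel node vis).2 → y ∈ vis ∨ pvReach g node y) :
    ∀ ns size vis y, y ∈ (pvDfsLoopA g fuel ns size vis).2 →
      y ∈ vis ∨ ∃ nb ∈ ns, pvReach g nb y := by
  intro ns
  induction ns with
  | nil => intro size vis y hy; exact Or.inl (by simpa [pvDfsLoopA] using hy)
  | cons nb rest ih =>
    intro size vis y hy
    simp only [pvDfsLoopA] at hy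
    by_cases hm : nb ∈ vis
    · rw [if_pos (pvContains_true hm)] at hy
      rcases ih size vis y hy with h | ⟨nb', h1, h2⟩
      · exact Or.inl h
      · exact Or.inr ⟨nb', List.mem_cons_of_mem _ h1, h2⟩
    · rw [if_neg (by rw [pvContains_false hm]; exact Bool.false_ne_true)] at hy
      rcases ih _ _ y hy with h | ⟨nb', h1, h2⟩
      · rcases hd nb vis y h with h' | h'
        · exact Or.inl h'
        · exact Or.inr ⟨nb, List.mem_cons_self, h'⟩
      · exact Or.inr ⟨nb', List.mem_cons_of_mem _ h1, h2⟩

lemma pvSndDfs (g : PySem.Dict (Int × Int) (List (Int × Int))) :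
    ∀ fuel node vis y, y ∈ (pvDfsA g fuel node vis).2 → y ∈ vis ∨ pvReach g node y := by
  intro fuel
  induction fuel with
  | zero => intro node vis y hy; exact Or.inl (by simpa [pvDfsA] using hy)
  | succ f ih =>
    intro node vis y hy
    simp only [pvDfsA] at hy
    rcases pvSndLoop g f ih _ _ _ y hy with h | ⟨nb, h1, h2⟩
    · rcases (PySem.Set.mem_add vis node y).mp h with h' | h'
      · exact Or.inl h'
      · exact Or.inr (h' ▸ Relation.ReflTransGen.refl)
    · exact Or.inr (Relation.ReflTransGen.head h1 h2)

-- with enough fuel, every node A's dfs visits has all its neighbours visited (modulo the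
-- initial visited set), and every neighbour of the start is visited
lemma pvBlack (g : PySem.Dict (Int × Int) (List (Int × Int))) (E : List (Int × Int))
    (Hg : ∀ x y, y ∈ g.getD x [] → y ∈ E) :
    ∀ u : Nat,
      (∀ ns size vis f, (∀ nb ∈ ns, nb ∈ E) → pvUnvis E vis ≤ u → u ≤ f →
        (∀ nb ∈ ns, nb ∈ (pvDfsLoopA g f ns size vis).2) ∧
        (∀ z ∈ (pvDfsLoopA g f ns size vis).2, z ∉ vis → ∀ w ∈ g.getD z [],
          w ∈ (pvDfsLoopA g f ns size vis).2 ∨ w ∈ vis))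
      ∧ (∀ node vis f, pvUnvis E (PySem.Set.add vis node) ≤ u → u + 1 ≤ f →
        node ∈ (pvDfsA g f node vis).2 ∧
        (∀ z ∈ (pvDfsA g f node vis).2, z ∉ vis → ∀ w ∈ g.getD z [],
          w ∈ (pvDfsA g f node vis).2 ∨ w ∈ vis)) := by
  intro u
  induction u using Nat.strong_induction_on with
  | _ u IH =>
    have hloop : ∀ ns size vis f, (∀ nb ∈ ns, nb ∈ E) → pvUnvis E vis ≤ u → u ≤ f →
        (∀ nb ∈ ns, nb ∈ (pvDfsLoopA g f ns size vis).2) ∧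
        (∀ z ∈ (pvDfsLoopA g f ns size vis).2, z ∉ vis → ∀ w ∈ g.getD z [],
          w ∈ (pvDfsLoopA g f ns size vis).2 ∨ w ∈ vis) := by
      intro ns
      induction ns with
      | nil =>
        intro size vis f _ _ _
        refine ⟨by simp, ?_⟩
        intro z hz hzv
        exact absurd (by simpa [pvDfsLoopA] using hz) hzv
      | cons nb rest ih =>
        intro size vis f hns hu hf
        by_cases hm : nb ∈ vis
        · have hrw : pvDfsLoopA g f (nb :: rest) size vis = pvDfsLoopA g f rest size vis := by
            simp only [pvDfsLoopA]; rw [if_pos (pvContains_true hm)]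
          obtain ⟨ha, hb⟩ := ih size vis f (fun y hy => hns y (List.mem_cons_of_mem _ hy)) hu hf
          rw [hrw]
          refine ⟨?_, hb⟩
          intro x hx
          rcases List.mem_cons.mp hx with rfl | hx'
          · exact pvDfsLoopA_mono_of g f (pvDfsA_mono g f) rest size vis x hm
          · exact ha x hx'
        · have hnbE : nb ∈ E := hns nb List.mem_cons_self
          have hlt := pvUnvis_strict E hnbE hm
          have hupos : 0 < u := by omega
          obtain ⟨hdn, hdb⟩ := (IH (u - 1) (by omega)).2 nb vis f (by omega) (by omega)
          have hrw : pvDfsLoopA g f (nb :: rest) size vis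
              = pvDfsLoopA g f rest (size + (pvDfsA g f nb vis).1) (pvDfsA g f nb vis).2 := by
            simp only [pvDfsLoopA]
            rw [if_neg (by rw [pvContains_false hm]; exact Bool.false_ne_true)]
          have hmono2 : ∀ y ∈ (pvDfsA g f nb vis).2,
              y ∈ (pvDfsLoopA g f rest (size + (pvDfsA g f nb vis).1) (pvDfsA g f nb vis).2).2 :=
            fun y hy => pvDfsLoopA_mono_of g f (pvDfsA_mono g f) rest _ _ y hy
          have hunv2 : pvUnvis E (pvDfsA g f nb vis).2 ≤ u :=
            le_trans (pvUnvis_mono E (fun y hy => pvDfsA_mono g f nb vis y hy)) hu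
          obtain ⟨ha, hb⟩ := ih (size + (pvDfsA g f nb vis).1) (pvDfsA g f nb vis).2 f
            (fun y hy => hns y (List.mem_cons_of_mem _ hy)) hunv2 hf
          rw [hrw]
          constructor
          · intro x hx
            rcases List.mem_cons.mp hx with rfl | hx'
            · exact hmono2 x hdn
            · exact ha x hx'
          · intro z hz hzv w hw
            by_cases hzd : z ∈ (pvDfsA g f nb vis).2
            · rcases hdb z hzd hzv w hw with h' | h'
              · exact Or.inl (hmono2 w h')
              · exact Or.inr h'
            · rcases hb z hz hzd w hw with h' | h'
              · exact Or.inl h'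
              · exact Or.inl (hmono2 w h')
    refine ⟨hloop, ?_⟩
    intro node vis f hu hf
    obtain ⟨f', rfl⟩ : ∃ k, f = k + 1 := ⟨f - 1, by omega⟩
    have hrw : pvDfsA g (f' + 1) node vis
        = pvDfsLoopA g f' (g.getD node []) 1 (PySem.Set.add vis node) := by
      simp only [pvDfsA]
    obtain ⟨ha, hb⟩ := hloop (g.getD node []) 1 (PySem.Set.add vis node) f'
      (fun y hy => Hg node y hy) hu (by omega)
    rw [hrw]
    have hnode : node ∈ (pvDfsLoopA g f' (g.getD node []) 1 (PySem.Set.add vis node)).2 :=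
      pvDfsLoopA_mono_of g f' (pvDfsA_mono g f') _ _ _ node
        ((PySem.Set.mem_add vis node node).mpr (Or.inr rfl))
    refine ⟨hnode, ?_⟩
    intro z hz hzv w hw
    by_cases hzn : z = node
    · subst hzn
      exact Or.inl (ha w hw)
    · have hz' : z ∉ PySem.Set.add vis node := by
        intro h
        rcases (PySem.Set.mem_add vis node z).mp h with h' | h'
        · exact hzv h'
        · exact hzn h'
      rcases hb z hz hz' w hw with h' | h'
      · exact Or.inl h'
      · rcases (PySem.Set.mem_add vis node w).mp h' with h'' | h''
        · exact Or.inr h''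
        · exact Or.inl (h'' ▸ hnode)

-- closedness of a visited set under A's adjacency
def pvClosed (g : PySem.Dict (Int × Int) (List (Int × Int))) (V : PySem.Set (Int × Int)) : Prop :=
  ∀ z ∈ V, ∀ w ∈ g.getD z [], w ∈ V

-- full characterisation of one A-side dfs call from an unvisited node over a closed visited set
lemma pvDfsA_char (g : PySem.Dict (Int × Int) (List (Int × Int))) (E : List (Int × Int))
    (Hg : ∀ x y, y ∈ g.getD x [] → y ∈ E) (c : Int × Int) (V : PySem.Set (Int × Int))
    (hcl : pvClosed g V) (f : Nat) (hf : E.length + 1 ≤ f) :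
    ∀ y, y ∈ (pvDfsA g f c V).2 ↔ y ∈ V ∨ pvReach g c y := by
  have hu : pvUnvis E (PySem.Set.add V c) ≤ E.length := pvUnvis_le E _
  obtain ⟨hc, hblack⟩ := (pvBlack g E Hg E.length).2 c V f hu (by omega)
  have hRcl : pvClosed g (pvDfsA g f c V).2 := by
    intro z hz w hw
    by_cases hzv : z ∈ V
    · exact pvDfsA_mono g f c V w (hcl z hzv w hw)
    · rcases hblack z hz hzv w hw with h | h
      · exact h
      · exact pvDfsA_mono g f c V w h
  intro y
  constructor
  · exact pvSndDfs g f c V y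
  · rintro (h | h)
    · exact pvDfsA_mono g f c V y h
    · induction h with
      | refl => exact hc
      | tail _ hstep ihh => exact hRcl _ ihh _ hstep

-- membership characterisation of one graph-building step, shared by both builders
lemma pvGraphA_step (d : PySem.Dict (Int × Int) (List (Int × Int))) (u v x y : Int × Int) :
    y ∈ ((d.modify u [] (fun l => l ++ [v])).modify v [] (fun l => l ++ [u])).getD x []
      ↔ y ∈ d.getD x [] ∨ (x = u ∧ y = v) ∨ (x = v ∧ y = u) := by
  simp only [PySem.Dict.getD_modify]
  split_ifs with h1 h2 h3 <;> simp_all [List.mem_append]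

lemma pvNbrsB_step (d : PySem.Dict (Int × Int) (PySem.Set (Int × Int))) (u v x y : Int × Int) :
    y ∈ ((d.insert u (PySem.Set.add (d.getD u PySem.Set.empty) v)).insert v
          (PySem.Set.add ((d.insert u (PySem.Set.add (d.getD u PySem.Set.empty) v)).getD v
            PySem.Set.empty) u)).getD x PySem.Set.empty
      ↔ y ∈ d.getD x PySem.Set.empty ∨ (x = u ∧ y = v) ∨ (x = v ∧ y = u) := by
  simp only [PySem.Dict.getD_insert]
  split_ifs with h1 h2 h3 <;> simp_all [PySem.Set.mem_add]

-- B's dict of neighbour sets has the same membership as A's adjacency map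
lemma pvNbrsB_memA (edges : List (Int × (Int × Int) × (Int × Int))) :
    ∀ x y, y ∈ (pvNbrsB edges).getD x PySem.Set.empty ↔ y ∈ (pvGraphA edges).getD x [] := by
  suffices h : ∀ (es : List (Int × (Int × Int) × (Int × Int)))
      (dB : PySem.Dict (Int × Int) (PySem.Set (Int × Int)))
      (dA : PySem.Dict (Int × Int) (List (Int × Int))),
      (∀ x y, y ∈ dB.getD x PySem.Set.empty ↔ y ∈ dA.getD x []) →
      ∀ x y, y ∈ (es.foldl
          (fun d e =>
            let d1 := d.insert e.2.1 (PySem.Set.add (d.getD e.2.1 PySem.Set.empty) e.2.2)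
            d1.insert e.2.2 (PySem.Set.add (d1.getD e.2.2 PySem.Set.empty) e.2.1)) dB).getD x PySem.Set.empty
        ↔ y ∈ (es.foldl
          (fun g e => (g.modify e.2.1 [] (fun l => l ++ [e.2.2])).modify e.2.2 [] (fun l => l ++ [e.2.1])) dA).getD x [] by
    exact h edges PySem.Dict.empty PySem.Dict.empty (by simp [PySem.Dict.getD_empty])
  intro es
  induction es with
  | nil => intro dB dA h x y; exact h x y
  | cons e rest ih =>
    intro dB dA h x y
    refine ih _ _ ?_ x y
    intro x' y'
    rw [pvNbrsB_step, pvGraphA_step, h x' y']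

-- A's adjacency map is symmetric
lemma pvGraphA_symm (edges : List (Int × (Int × Int) × (Int × Int))) :
    ∀ x y, y ∈ (pvGraphA edges).getD x [] → x ∈ (pvGraphA edges).getD y [] := by
  suffices h : ∀ (es : List (Int × (Int × Int) × (Int × Int)))
      (d : PySem.Dict (Int × Int) (List (Int × Int))),
      (∀ x y, y ∈ d.getD x [] → x ∈ d.getD y []) →
      ∀ x y, y ∈ (es.foldl
          (fun g e => (g.modify e.2.1 [] (fun l => l ++ [e.2.2])).modify e.2.2 [] (fun l => l ++ [e.2.1])) d).getD x []
        → x ∈ (es.foldl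
          (fun g e => (g.modify e.2.1 [] (fun l => l ++ [e.2.2])).modify e.2.2 [] (fun l => l ++ [e.2.1])) d).getD y [] by
    exact h edges PySem.Dict.empty (by simp [PySem.Dict.getD_empty])
  intro es
  induction es with
  | nil => intro d h x y; exact h x y
  | cons e rest ih =>
    intro d h x y
    refine ih _ ?_ x y
    intro x' y' hy'
    rw [pvGraphA_step] at hy' ⊢
    rcases hy' with h' | ⟨rfl, rfl⟩ | ⟨rfl, rfl⟩
    · exact Or.inl (h x' y' h')
    · tauto
    · tauto

-- every recorded neighbour is an edge endpoint
lemma pvGraphA_mem (coords : List (Int × Int)) (edges : List (Int × (Int × Int) × (Int × Int))) :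
    ∀ x y, y ∈ (pvGraphA edges).getD x [] → y ∈ pvUniv coords edges := by
  suffices h : ∀ (es : List (Int × (Int × Int) × (Int × Int)))
      (d : PySem.Dict (Int × Int) (List (Int × Int))),
      (∀ x y, y ∈ d.getD x [] → y ∈ pvUniv coords edges) →
      (∀ e ∈ es, e.2.1 ∈ pvUniv coords edges ∧ e.2.2 ∈ pvUniv coords edges) →
      ∀ x y, y ∈ (es.foldl
          (fun g e => (g.modify e.2.1 [] (fun l => l ++ [e.2.2])).modify e.2.2 [] (fun l => l ++ [e.2.1])) d).getD x []
        → y ∈ pvUniv coords edges by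
    refine h edges PySem.Dict.empty (by simp [PySem.Dict.getD_empty]) ?_
    intro e he
    constructor <;> exact List.mem_append_right _ (List.mem_flatMap.mpr ⟨e, he, by simp⟩)
  intro es
  induction es with
  | nil => intro d h _ x y hy; exact h x y hy
  | cons e rest ih =>
    intro d h hes x y hy
    refine ih _ ?_ (fun e' he' => hes e' (List.mem_cons_of_mem _ he')) x y hy
    intro x' y' hy'
    rw [pvGraphA_step] at hy'
    obtain ⟨he1, he2⟩ := hes e List.mem_cons_self
    rcases hy' with h' | ⟨rfl, rfl⟩ | ⟨rfl, rfl⟩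
    · exact h x' y' h'
    · exact he2
    · exact he1

-- reachability from outside a closed set never enters it (uses symmetry)
lemma pvReach_disjoint (g : PySem.Dict (Int × Int) (List (Int × Int)))
    (hsym : ∀ x y, y ∈ g.getD x [] → x ∈ g.getD y []) (V : PySem.Set (Int × Int))
    (hcl : pvClosed g V) {c : Int × Int} (hc : c ∉ V) :
    ∀ y, pvReach g c y → y ∉ V := by
  intro y h
  induction h with
  | refl => exact hc
  | tail _ hstep ihh =>
    intro hy
    exact ihh (hcl _ hy _ (hsym _ _ hstep))

lemma pvBfsB_nil (g : PySem.Dict (Int × Int) (PySem.Set (Int × Int))) (f : Nat)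
    (comp : PySem.Set (Int × Int)) : pvBfsB g f comp [] = comp := by
  cases f <;> rfl

-- B's frontier loop: with enough fuel it computes a duplicate-free superset of comp that is
-- exactly comp's reachability closure
lemma pvBfsB_char (gB : PySem.Dict (Int × Int) (PySem.Set (Int × Int)))
    (gA : PySem.Dict (Int × Int) (List (Int × Int))) (E : List (Int × Int))
    (hmem : ∀ x y, y ∈ gB.getD x PySem.Set.empty ↔ y ∈ gA.getD x [])
    (Hg : ∀ x y, y ∈ gA.getD x [] → y ∈ E) (c : Int × Int) :
    ∀ u : Nat, ∀ comp frontier : PySem.Set (Int × Int), ∀ f : Nat,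
      comp.Nodup → (∀ x ∈ frontier, x ∈ comp) → (∀ z ∈ comp, pvReach gA c z) →
      (∀ z ∈ comp, z ∉ frontier → ∀ w ∈ gA.getD z [], w ∈ comp) →
      pvUnvis E comp ≤ u → u + 1 ≤ f →
      (pvBfsB gB f comp frontier).Nodup ∧
      (∀ x ∈ comp, x ∈ pvBfsB gB f comp frontier) ∧
      (∀ z ∈ pvBfsB gB f comp frontier, pvReach gA c z) ∧
      pvClosed gA (pvBfsB gB f comp frontier) := by
  intro u
  induction u using Nat.strong_induction_on with
  | _ u IH =>
    intro comp frontier f hnd hfc hreach hblk hu hf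
    match f, frontier with
    | f' + 1, [] =>
      rw [pvBfsB_nil]
      refine ⟨hnd, fun x hx => hx, hreach, ?_⟩
      intro z hz w hw
      exact hblk z hz (by simp) w hw
    | f' + 1, x0 :: fr0 =>
      have hrw : pvBfsB gB (f' + 1) comp (x0 :: fr0) = pvBfsB gB f'
          (PySem.Set.union comp (PySem.Set.diff
            (PySem.Set.ofList ((x0 :: fr0).flatMap (fun x => gB.getD x PySem.Set.empty))) comp))
          (PySem.Set.diff
            (PySem.Set.ofList ((x0 :: fr0).flatMap (fun x => gB.getD x PySem.Set.empty))) comp) := by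
        simp only [pvBfsB]
      set fr : List (Int × Int) := x0 :: fr0 with hfr
      set fr' := PySem.Set.diff
        (PySem.Set.ofList (fr.flatMap (fun x => gB.getD x PySem.Set.empty))) comp with hfr'
      have hmemfr' : ∀ y, y ∈ fr' ↔ ((∃ x ∈ fr, y ∈ gA.getD x []) ∧ y ∉ comp) := by
        intro y
        rw [hfr', PySem.Set.mem_diff, PySem.Set.mem_ofList, List.mem_flatMap]
        constructor
        · rintro ⟨⟨x, hx, hyx⟩, hyc⟩
          exact ⟨⟨x, hx, (hmem x y).mp hyx⟩, hyc⟩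
        · rintro ⟨⟨x, hx, hyx⟩, hyc⟩
          exact ⟨⟨x, hx, (hmem x y).mpr hyx⟩, hyc⟩
      rcases hfr'e : fr' with _ | ⟨y0, fr'0⟩
      · -- the new frontier is empty: comp is already closed and the loop stops
        have hcomp' : PySem.Set.union comp ([] : PySem.Set (Int × Int)) = comp := rfl
        rw [hrw, hfr'e, hcomp', pvBfsB_nil]
        have hcl : pvClosed gA comp := by
          intro z hz w hw
          by_cases hzf : z ∈ fr
          · by_contra hwc
            have : w ∈ fr' := (hmemfr' w).mpr ⟨⟨z, hzf, hw⟩, hwc⟩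
            rw [hfr'e] at this
            cases this
          · exact hblk z hz hzf w hw
        exact ⟨hnd, fun x hx => hx, hreach, hcl⟩
      · -- productive step: at least one new node joins comp
        have hy0 := (hmemfr' y0).mp (by rw [hfr'e]; exact List.mem_cons_self)
        have hy0E : y0 ∈ E := by
          obtain ⟨⟨x, _, hyx⟩, _⟩ := hy0
          exact Hg x y0 hyx
        have hy0c : y0 ∉ comp := hy0.2
        have hsub : ∀ z, z ∈ comp → z ∈ PySem.Set.union comp fr' :=
          fun z hz => (PySem.Set.mem_union comp fr' z).mpr (Or.inl hz)
        have hdec : pvUnvis E (PySem.Set.union comp fr') < pvUnvis E comp := by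
          have h1 : pvUnvis E (PySem.Set.union comp fr') ≤ pvUnvis E (PySem.Set.add comp y0) := by
            refine pvUnvis_mono E ?_
            intro z hz
            rcases (PySem.Set.mem_add comp y0 z).mp hz with h' | h'
            · exact hsub z h'
            · subst h'
              exact (PySem.Set.mem_union comp fr' z).mpr (Or.inr (by rw [hfr'e]; exact List.mem_cons_self))
          exact Nat.lt_of_le_of_lt h1 (pvUnvis_strict E hy0E hy0c)
        have hupos : 0 < u := by omega
        rw [hrw]
        have hnd' : (PySem.Set.union comp fr').Nodup := PySem.Set.nodup_union comp fr' hnd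
        have hfc' : ∀ x ∈ fr', x ∈ PySem.Set.union comp fr' :=
          fun x hx => (PySem.Set.mem_union comp fr' x).mpr (Or.inr hx)
        have hreach' : ∀ z ∈ PySem.Set.union comp fr', pvReach gA c z := by
          intro z hz
          rcases (PySem.Set.mem_union comp fr' z).mp hz with h' | h'
          · exact hreach z h'
          · obtain ⟨⟨x, hxfr, hzx⟩, _⟩ := (hmemfr' z).mp h'
            exact Relation.ReflTransGen.tail (hreach x (hfc x hxfr)) hzx
        have hblk' : ∀ z ∈ PySem.Set.union comp fr', z ∉ fr' → ∀ w ∈ gA.getD z [],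
            w ∈ PySem.Set.union comp fr' := by
          intro z hz hzf' w hw
          rcases (PySem.Set.mem_union comp fr' z).mp hz with h' | h'
          · by_cases hzf : z ∈ fr
            · by_cases hwc : w ∈ comp
              · exact hsub w hwc
              · exact hfc' w ((hmemfr' w).mpr ⟨⟨z, hzf, hw⟩, hwc⟩)
            · exact hsub w (hblk z h' hzf w hw)
          · exact absurd h' hzf'
        obtain ⟨h1, h2, h3, h4⟩ := IH (u - 1) (by omega) (PySem.Set.union comp fr') fr' f'
          hnd' hfc' hreach' hblk' (by omega) (by omega)
        exact ⟨h1, fun x hx => h2 x (hsub x hx), h3, h4⟩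

-- the main loop: A's visited/sizes state and B's seen/sizes state stay in lockstep
lemma pvMain (gA : PySem.Dict (Int × Int) (List (Int × Int)))
    (gB : PySem.Dict (Int × Int) (PySem.Set (Int × Int))) (E : List (Int × Int))
    (hmem : ∀ x y, y ∈ gB.getD x PySem.Set.empty ↔ y ∈ gA.getD x [])
    (Hg : ∀ x y, y ∈ gA.getD x [] → y ∈ E)
    (hsym : ∀ x y, y ∈ gA.getD x [] → x ∈ gA.getD y []) (F : Nat) (hF : F = E.length + 1) :
    ∀ cs : List (Int × Int), ∀ out : List Int, ∀ VA VB : PySem.Set (Int × Int),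
      VA.Nodup → (∀ x, x ∈ VA ↔ x ∈ VB) → pvClosed gA VA →
      (cs.foldl
        (fun acc coord =>
          if PySem.Set.contains acc.2 coord then acc
          else
            let p := pvDfsA gA F coord acc.2
            (acc.1 ++ [p.1], p.2)) (out, VA)).1
      = (cs.foldl
        (fun acc c =>
          if PySem.Set.contains acc.2 c then acc
          else
            let comp := pvBfsB gB F (PySem.Set.ofList [c]) (PySem.Set.ofList [c])
            (acc.1 ++ [PySem.Set.len comp], PySem.Set.union acc.2 comp)) (out, VB)).1 := by
  intro cs
  induction cs with
  | nil => intro out VA VB _ _ _; rfl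
  | cons c rest ih =>
    intro out VA VB hnd hVAB hcl
    simp only [List.foldl_cons]
    by_cases hm : c ∈ VA
    · rw [if_pos (pvContains_true hm), if_pos (pvContains_true ((hVAB c).mp hm))]
      exact ih out VA VB hnd hVAB hcl
    · have hmB : c ∉ VB := fun h => hm ((hVAB c).mpr h)
      rw [if_neg (by rw [pvContains_false hm]; exact Bool.false_ne_true),
        if_neg (by rw [pvContains_false hmB]; exact Bool.false_ne_true)]
      -- characterise both component computations
      have hA := pvDfsA_char gA E Hg c VA hcl F (by omega)
      set R := (pvDfsA gA F c VA).2 with hR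
      obtain ⟨hBnd, hBsub, hBreach, hBcl⟩ := pvBfsB_char gB gA E hmem Hg c E.length
        (PySem.Set.ofList [c]) (PySem.Set.ofList [c]) F (PySem.Set.nodup_ofList [c])
        (fun x hx => hx) (by intro z hz; simp at hz; subst hz; exact Relation.ReflTransGen.refl)
        (by intro z hz hznf; exact absurd hz hznf) (pvUnvis_le E _) (by omega)
      set C := pvBfsB gB F (PySem.Set.ofList [c]) (PySem.Set.ofList [c]) with hC
      have hcC : c ∈ C := hBsub c (by simp)
      have hCmem : ∀ y, y ∈ C ↔ pvReach gA c y := by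
        intro y
        constructor
        · exact hBreach y
        · intro h
          induction h with
          | refl => exact hcC
          | tail _ hstep ihh => exact hBcl _ ihh _ hstep
      -- the two recorded sizes agree
      have hdisj : ∀ y, pvReach gA c y → y ∉ VA := pvReach_disjoint gA hsym VA hcl hm
      have hperm : R.Perm (VA ++ C) := by
        refine (List.perm_ext_iff_of_nodup (pvDfsA_nodup gA F c VA hnd) ?_).mpr ?_
        · refine hnd.append hBnd ?_
          intro a haV haC
          exact hdisj a ((hCmem a).mp haC) haV
        · intro a
          rw [List.mem_append, hA a, hCmem a]
      have hsize : (pvDfsA gA F c VA).1 = PySem.Set.len C := by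
        have h1 := pvCntDfs gA F c VA hm
        have h2 : R.length = VA.length + C.length := by
          rw [hperm.length_eq, List.length_append]
        rw [← hR] at h1
        have : PySem.Set.len C = (C.length : Int) := by
          simp [PySem.Set.len]
        omega
      rw [hsize]
      -- the two visited sets stay membership-equal, nodup and closed
      refine ih (out ++ [PySem.Set.len C]) R (PySem.Set.union VB C)
        (pvDfsA_nodup gA F c VA hnd) ?_ ?_
      · intro x
        rw [hA x, PySem.Set.mem_union, ← hVAB x, hCmem x]
      · intro z hz w hw
        rw [hA] at hz ⊢
        rcases hz with h' | h'
        · exact Or.inl (hcl z h' w hw)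
        · exact Or.inr (Relation.ReflTransGen.tail h' hw)

lemma pvUniv_len (coords : List (Int × Int)) (edges : List (Int × (Int × Int) × (Int × Int))) :
    (pvUniv coords edges).length = coords.length + 2 * edges.length := by
  simp only [pvUniv, List.length_append]
  congr 1
  induction edges with
  | nil => simp
  | cons e es ih => simp only [List.flatMap_cons, List.length_append, List.length_cons, ih]; simp; ring

-- ===== VERDICT (by name: the statement is the Claim_ definition above) =====
theorem find_n_largest_connected_components_spec : Claim_equal_find_n_largest_connected_components := by
  intro coords edges n _
  unfold Spec_find_n_largest_connected_components
  simp only [find_n_largest_connected_components, find_n_largest_connected_components_alt]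
  have hF : 2 * edges.length + coords.length + 1 = (pvUniv coords edges).length + 1 := by
    rw [pvUniv_len]; ring
  have h := pvMain (pvGraphA edges) (pvNbrsB edges) (pvUniv coords edges)
    (pvNbrsB_memA edges) (pvGraphA_mem coords edges) (pvGraphA_symm edges)
    (2 * edges.length + coords.length + 1) hF coords [] PySem.Set.empty PySem.Set.empty
    List.nodup_nil (fun x => Iff.rfl) (by intro z hz; cases hz)
  rw [h]
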